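-- pv_equiv track=rewrite | github.com/Rohitk0102/Cryptx-Crypto_Portfolio_Tracker | Codevita/zoobin.py | find_bijections
-- ===== SOURCE A (Python) =====
-- def find_bijections(graph1, graph2, node_count):
--     degree1 = [0]*(node_count+1)
--     degree2 = [0]*(node_count+1)
--     for i in range(1,node_count+1):
--         degree1[i] = len(graph1[i])
--         degree2[i] = len(graph2[i])
--     possible_matches = {u: [v for v in range(1,node_count+1) if degree2[v]==degree1[u]] for u in range(1,node_count+1)}
--     sorted_nodes = sorted(range(1,node_count+1), key=lambda x: -degree1[x])
--     used_in_graph2 = [False]*(node_count+1)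
--     current_map = [0]*(node_count+1)
--     solutions = []
--     def check_consistency(node_u, node_v):
--         for neighbor in graph1[node_u]:
--             if current_map[neighbor] != 0:
--                 if current_map[neighbor] not in graph2[node_v]:
--                     return False
--         return True
--     def search(position):
--         if position >= node_count:
--             solutions.append(current_map[1:].copy())
--             return
--         current_node = sorted_nodes[position]
--         for candidate in possible_matches[current_node]:
--             if not used_in_graph2[candidate] and check_consistency(current_node, candidate):
--                 used_in_graph2[candidate] = True
--                 current_map[current_node] = candidate
--                 search(position+1)
--                 current_map[current_node] = 0
--                 used_in_graph2[candidate] = False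
--     search(0)
--     result_maps = []
--     for mapping in solutions:
--         result_maps.append(tuple(mapping))
--     return result_maps
-- ===== SOURCE B (Python) =====
-- def find_bijections(graph1, graph2, node_count):
--     n = node_count
--     deg1 = [0] + [len(graph1[u]) for u in range(1, n + 1)]
--     deg2 = [0] + [len(graph2[v]) for v in range(1, n + 1)]
--     order = sorted(range(1, n + 1), key=lambda x: -deg1[x])
--
--     def consistent(cmap, u, v):
--         return all(cmap[w] == 0 or cmap[w] in graph2[v] for w in graph1[u])
--
--     def extend(pos, cmap):
--         if pos >= n:
--             return [tuple(cmap[1:])]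
--         u = order[pos]
--         sols = []
--         for v in range(1, n + 1):
--             if deg2[v] == deg1[u] and v not in cmap and consistent(cmap, u, v):
--                 sols += extend(pos + 1, cmap[:u] + [v] + cmap[u + 1:])
--         return sols
--
--     return extend(0, [0] * (n + 1))
-- ===== Notes on version B (the rewrite author's own statement) =====
-- stated objective: alternative
-- what changed: The shared-mutable-state backtracking (used_in_graph2 array, in-place current_map with undo after each recursive call, solutions list appended to, and a precomputed possible_matches dict) is replaced by a pure recursion that passes an immutable mapping, tests candidate availability by membership in the mapping, filters candidates by degree inline, and returns the concatenated solution lists; visitation order is identical so the result is identical.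
-- outside the precondition, e.g. on find_bijections({1: [5], 2: []}, {1: [], 2: []}, 2): A returns [], B returns []
import Mathlib
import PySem

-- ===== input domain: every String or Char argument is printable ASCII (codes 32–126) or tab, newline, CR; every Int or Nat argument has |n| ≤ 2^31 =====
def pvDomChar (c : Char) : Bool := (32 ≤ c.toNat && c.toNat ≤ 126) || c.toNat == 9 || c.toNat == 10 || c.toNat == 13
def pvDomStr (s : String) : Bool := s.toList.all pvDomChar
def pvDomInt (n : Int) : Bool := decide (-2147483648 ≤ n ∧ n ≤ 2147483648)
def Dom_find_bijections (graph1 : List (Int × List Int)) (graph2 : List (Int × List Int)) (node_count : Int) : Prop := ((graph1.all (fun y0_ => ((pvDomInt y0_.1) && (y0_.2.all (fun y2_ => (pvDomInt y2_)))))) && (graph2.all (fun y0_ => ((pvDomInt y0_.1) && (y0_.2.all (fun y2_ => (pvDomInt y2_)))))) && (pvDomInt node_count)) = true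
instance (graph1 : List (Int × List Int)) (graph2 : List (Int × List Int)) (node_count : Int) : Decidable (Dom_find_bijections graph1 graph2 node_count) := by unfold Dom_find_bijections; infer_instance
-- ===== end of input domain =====

-- B replaces A's shared-mutable-state backtracking (used array, in-place map with undo, appended
-- solutions, precomputed possible_matches dict) by a pure recursion that returns the concatenated
-- solution lists of an immutable mapping; same enumeration order, so the same return value.

-- ===== PORT A =====
-- A's inner 'check_consistency(node_u, node_v)' (reads the shared current_map, here a parameter)
def pvCheckA (G1 G2 : PySem.Dict Int (List Int)) (cmap : List Int) (u v : Int) : Bool :=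
  (G1.getD u []).all (fun w =>
    let m := PySem.List.pyGetD cmap w 0
    if m ≠ 0 then (G2.getD v []).contains m else true)

-- the 'for candidate in possible_matches[current_node]' loop of A's 'search', threading the shared
-- state (used_in_graph2, current_map, solutions); 'next' is the recursive call search(position+1)
def pvLoopA (next : List Bool × List Int × List (List Int) → List Bool × List Int × List (List Int))
    (cond : List Bool × List Int × List (List Int) → Int → Bool) (u : Int) :
    List Int → List Bool × List Int × List (List Int) → List Bool × List Int × List (List Int)
  | [], st => st
  | c :: rest, st =>
    if cond st c then
      let st2 := next (PySem.List.pySetD st.1 c true, PySem.List.pySetD st.2.1 u c, st.2.2)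
      pvLoopA next cond u rest
        (PySem.List.pySetD st2.1 c false, PySem.List.pySetD st2.2.1 u 0, st2.2.2)
    else pvLoopA next cond u rest st

-- A's recursive 'search(position)'; fuel is a totality guard (node_count.toNat at the top call,
-- decreasing with the position; the fuel-0 else-branch is never reached from the top call)
def pvSearchA (G1 G2 : PySem.Dict Int (List Int)) (n : Int) (pm : PySem.Dict Int (List Int))
    (order : List Int) : Nat → Nat → (List Bool × List Int × List (List Int)) →
    (List Bool × List Int × List (List Int))
  | 0, pos, st =>
    if n ≤ (pos : Int) then (st.1, st.2.1, st.2.2 ++ [PySem.List.slice st.2.1 (some 1) none]) else st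
  | f+1, pos, st =>
    if n ≤ (pos : Int) then (st.1, st.2.1, st.2.2 ++ [PySem.List.slice st.2.1 (some 1) none])
    else
      let u := PySem.List.pyGetD order (pos : Int) 0
      pvLoopA (pvSearchA G1 G2 n pm order f (pos + 1))
        (fun st c => !(PySem.List.pyGetD st.1 c false) && pvCheckA G1 G2 st.2.1 u c)
        u (pm.getD u []) st

def find_bijections (graph1 : List (Int × List Int)) (graph2 : List (Int × List Int)) (node_count : Int) : List (List Int) :=
  let G1 := PySem.Dict.ofList graph1
  let G2 := PySem.Dict.ofList graph2
  -- the loop 'degree1[i] = len(graph1[i]); degree2[i] = len(graph2[i])'; a missing key is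
  -- Python's KeyError, modelled by none (these inputs are outside Pre_)
  let degs? : Option (List Int × List Int) := (PySem.List.pyRange 1 (node_count + 1) 1).foldl
    (fun acc i =>
      match acc with
      | none => none
      | some d =>
        match G1.get? i, G2.get? i with
        | some l1, some l2 =>
          some (PySem.List.pySetD d.1 i (PySem.List.len l1),
                PySem.List.pySetD d.2 i (PySem.List.len l2))
        | _, _ => none)
    (some (List.replicate (node_count + 1).toNat 0, List.replicate (node_count + 1).toNat 0))
  match degs? with
  | none => []  -- Python raises KeyError here; these inputs are excluded by Pre_
  | some degs =>
  let degree1 := degs.1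
  let degree2 := degs.2
  let pm := (PySem.List.pyRange 1 (node_count + 1) 1).foldl
    (fun d u => d.insert u ((PySem.List.pyRange 1 (node_count + 1) 1).filter
      (fun v => PySem.List.pyGetD degree2 v 0 == PySem.List.pyGetD degree1 u 0)))
    PySem.Dict.empty
  let sorted_nodes := PySem.List.sorted (PySem.List.pyRange 1 (node_count + 1) 1)
    (fun x => -(PySem.List.pyGetD degree1 x 0)) false
  let st := pvSearchA G1 G2 node_count pm sorted_nodes node_count.toNat 0
    (List.replicate (node_count + 1).toNat false, List.replicate (node_count + 1).toNat 0, [])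
  st.2.2.foldl (fun acc m => acc ++ [m]) []

-- ===== PORT B =====
-- B's 'consistent(cmap, u, v)': all(cmap[w] == 0 or cmap[w] in graph2[v] for w in graph1[u])
def pvConsistentB (G1 G2 : PySem.Dict Int (List Int)) (cmap : List Int) (u v : Int) : Bool :=
  (G1.getD u []).all (fun w =>
    (PySem.List.pyGetD cmap w 0 == 0) || (G2.getD v []).contains (PySem.List.pyGetD cmap w 0))

-- B's pure 'extend(pos, cmap)', returning the solutions below this frame; fuel as in pvSearchA
def pvExtendB (G1 G2 : PySem.Dict Int (List Int)) (n : Int) (deg1 deg2 order : List Int) :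
    Nat → Nat → List Int → List (List Int)
  | 0, pos, cmap => if n ≤ (pos : Int) then [PySem.List.slice cmap (some 1) none] else []
  | f+1, pos, cmap =>
    if n ≤ (pos : Int) then [PySem.List.slice cmap (some 1) none]
    else
      let u := PySem.List.pyGetD order (pos : Int) 0
      (PySem.List.pyRange 1 (n + 1) 1).foldl
        (fun sols v =>
          if (PySem.List.pyGetD deg2 v 0 == PySem.List.pyGetD deg1 u 0)
              && !(cmap.contains v) && pvConsistentB G1 G2 cmap u v then
            sols ++ pvExtendB G1 G2 n deg1 deg2 order f (pos + 1)
              (PySem.List.slice cmap none (some u) ++ [v] ++ PySem.List.slice cmap (some (u + 1)) none)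
          else sols) []

def find_bijections_alt (graph1 : List (Int × List Int)) (graph2 : List (Int × List Int)) (node_count : Int) : List (List Int) :=
  let G1 := PySem.Dict.ofList graph1
  let G2 := PySem.Dict.ofList graph2
  -- 'graph1[u]' in the comprehensions raises KeyError on a missing key (outside Pre_): none
  (((PySem.List.pyRange 1 (node_count + 1) 1).mapM (fun u => G1.get? u)).elim []
    (fun adj1 =>
      (((PySem.List.pyRange 1 (node_count + 1) 1).mapM (fun v => G2.get? v)).elim []
        (fun adj2 =>
          let deg1 := [(0 : Int)] ++ adj1.map PySem.List.len
          let deg2 := [(0 : Int)] ++ adj2.map PySem.List.len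
          let order := PySem.List.sorted (PySem.List.pyRange 1 (node_count + 1) 1)
            (fun x => -(PySem.List.pyGetD deg1 x 0)) false
          pvExtendB G1 G2 node_count deg1 deg2 order node_count.toNat 0
            (List.replicate (node_count + 1).toNat 0)))))

-- ===== PRECONDITION & SPEC =====
-- Pre_ excludes exactly the crash closure of the Python: a node 1..node_count missing from either
-- dict (KeyError in the degree loop) or a neighbour index outside current_map's index range
-- (IndexError in check_consistency); when such an out-of-range neighbour is never reached (no
-- candidate passes the degree test) A returns [] and B returns [] as well — see claim.json cites.
-- (The two length bounds are implied by the key conditions — n distinct keys need n entries — and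
-- only let the condition be decided without enumerating a huge range.)
def Pre_find_bijections (graph1 : List (Int × List Int)) (graph2 : List (Int × List Int)) (node_count : Int) : Prop :=
  node_count ≤ (graph1.length : Int) ∧ node_count ≤ (graph2.length : Int) ∧
  ∀ i ∈ PySem.List.pyRange 1 (node_count + 1) 1,
    (PySem.Dict.ofList graph1).contains i = true ∧
    (PySem.Dict.ofList graph2).contains i = true ∧
    ∀ w ∈ (PySem.Dict.ofList graph1).getD i [], -(node_count + 1) ≤ w ∧ w < node_count + 1
instance (graph1 : List (Int × List Int)) (graph2 : List (Int × List Int)) (node_count : Int) : Decidable (Pre_find_bijections graph1 graph2 node_count) := by unfold Pre_find_bijections; infer_instance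

def pvWitness_find_bijections : (List (Int × List Int)) × (List (Int × List Int)) × Int :=
  ([(1, [2]), (2, [1, 3]), (3, [2])], [(1, [2, 3]), (2, [1]), (3, [1])], 3)

def Spec_find_bijections (graph1 : List (Int × List Int)) (graph2 : List (Int × List Int)) (node_count : Int) (out : List (List Int)) : Prop := out = find_bijections_alt graph1 graph2 node_count
instance (graph1 : List (Int × List Int)) (graph2 : List (Int × List Int)) (node_count : Int) (out : List (List Int)) : Decidable (Spec_find_bijections graph1 graph2 node_count out) := by unfold Spec_find_bijections; infer_instance

-- ===== CLAIM (what is proved, stated in full; the proofs are below) =====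
def Claim_equal_find_bijections : Prop := ∀ (graph1 : List (Int × List Int)) (graph2 : List (Int × List Int)) (node_count : Int), Dom_find_bijections graph1 graph2 node_count → Pre_find_bijections graph1 graph2 node_count → Spec_find_bijections graph1 graph2 node_count (find_bijections graph1 graph2 node_count)

-- ===== LEMMAS AND PROOFS =====

theorem pvWitness_ok :
    Dom_find_bijections pvWitness_find_bijections.1 pvWitness_find_bijections.2.1 pvWitness_find_bijections.2.2 ∧
    Pre_find_bijections pvWitness_find_bijections.1 pvWitness_find_bijections.2.1 pvWitness_find_bijections.2.2 := by
  constructor <;> decide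

-- the two consistency tests agree: 'if m != 0 then m in g2[v] else True' is 'm == 0 or m in g2[v]'
theorem check_eq_consistent (G1 G2 : PySem.Dict Int (List Int)) (cmap : List Int) (u v : Int) :
    pvCheckA G1 G2 cmap u v = pvConsistentB G1 G2 cmap u v := by
  simp only [pvCheckA, pvConsistentB]
  congr 1
  funext w
  by_cases h : PySem.List.pyGetD cmap w 0 = 0 <;> simp [h]

-- dict-comprehension lookup: getD of a fold of inserts over fresh keys
theorem getD_foldl_insert_of_not_mem (f : Int → List Int) (ks : List Int)
    (d : PySem.Dict Int (List Int)) (u : Int) (hu : u ∉ ks) :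
    (ks.foldl (fun d k => d.insert k (f k)) d).getD u [] = d.getD u [] := by
  induction ks generalizing d with
  | nil => rfl
  | cons k rest ih =>
    simp only [List.mem_cons, not_or] at hu
    simp only [List.foldl_cons, ih _ hu.2, PySem.Dict.getD_insert,
      if_neg hu.1]

theorem getD_foldl_insert_of_mem (f : Int → List Int) (ks : List Int)
    (d : PySem.Dict Int (List Int)) (u : Int) (hu : u ∈ ks) (hnd : ks.Nodup) :
    (ks.foldl (fun d k => d.insert k (f k)) d).getD u [] = f u := by
  induction ks generalizing d with
  | nil => cases hu
  | cons k rest ih =>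
    rcases List.mem_cons.mp hu with h | h
    · subst h
      simp [List.foldl_cons,
        getD_foldl_insert_of_not_mem f rest _ u (List.nodup_cons.mp hnd).1,
        PySem.Dict.getD_insert]
    · simpa only [List.foldl_cons] using ih _ h (List.nodup_cons.mp hnd).2

-- B's slice-splice is A's in-place assignment
theorem splice_eq_set (cmap : List Int) (u v : Int) (hu : 0 ≤ u) (hl : u.toNat < cmap.length) :
    PySem.List.slice cmap none (some u) ++ [v] ++ PySem.List.slice cmap (some (u + 1)) none
      = cmap.set u.toNat v := by
  rw [PySem.List.slice_to cmap hu, PySem.List.slice_from cmap (by omega : (0 : Int) ≤ u + 1),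
    List.set_eq_take_cons_drop v hl]
  have h1 : (u + 1).toNat = u.toNat + 1 := by omega
  simp [h1]

-- replacing a 0 entry: membership of the updated current_map, for nonzero values
theorem mem_set_iff_of_zero (cmap : List Int) (i : Nat) (hi : i < cmap.length) (h0 : cmap[i] = 0)
    (w : Int) (hw : w ≠ 0) (v : Int) : w ∈ cmap.set i v ↔ w = v ∨ w ∈ cmap := by
  rw [List.set_eq_take_cons_drop v hi]
  conv_rhs => rw [← List.take_append_drop i cmap, List.drop_eq_getElem_cons hi]
  simp [h0, hw, List.mem_append, or_left_comm]

-- A's degree loop builds exactly B's degree lists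
theorem deg_loop_eq (G1 G2 : PySem.Dict Int (List Int)) (n : Int) (hn : 0 ≤ n) :
    (PySem.List.pyRange 1 (n + 1) 1).foldl
      (fun (d : List Int × List Int) i =>
        (PySem.List.pySetD d.1 i (PySem.List.len (G1.getD i [])),
         PySem.List.pySetD d.2 i (PySem.List.len (G2.getD i []))))
      (List.replicate (n + 1).toNat 0, List.replicate (n + 1).toNat 0)
    = ([(0 : Int)] ++ (PySem.List.pyRange 1 (n + 1) 1).map (fun u => PySem.List.len (G1.getD u [])),
       [(0 : Int)] ++ (PySem.List.pyRange 1 (n + 1) 1).map (fun v => PySem.List.len (G2.getD v []))) := by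
  have aux : ∀ m : Nat, (m : Int) ≤ n →
      (PySem.List.pyRange 1 ((m : Int) + 1) 1).foldl
        (fun (d : List Int × List Int) i =>
          (PySem.List.pySetD d.1 i (PySem.List.len (G1.getD i [])),
           PySem.List.pySetD d.2 i (PySem.List.len (G2.getD i []))))
        (List.replicate (n + 1).toNat 0, List.replicate (n + 1).toNat 0)
      = ([(0 : Int)] ++ (PySem.List.pyRange 1 ((m : Int) + 1) 1).map (fun u => PySem.List.len (G1.getD u []))
            ++ List.replicate (n.toNat - m) (0 : Int),
         [(0 : Int)] ++ (PySem.List.pyRange 1 ((m : Int) + 1) 1).map (fun v => PySem.List.len (G2.getD v []))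
            ++ List.replicate (n.toNat - m) (0 : Int)) := by
    intro m
    induction m with
    | zero =>
      intro _
      rw [PySem.List.pyRange_one_eq_nil (by norm_num)]
      have h1 : (n + 1).toNat = n.toNat - 0 + 1 := by omega
      simp [h1, List.replicate_succ]
    | succ m ih =>
      intro hm
      have hm' : (m : Int) ≤ n := by push_cast at hm ⊢; omega
      have hrw : ((m + 1 : Nat) : Int) + 1 = ((m : Int) + 1) + 1 := by push_cast; ring
      rw [hrw, PySem.List.pyRange_one_succ_right (by omega), List.foldl_append, ih hm']
      have hlen1 : ([(0:Int)] ++ (PySem.List.pyRange 1 ((m : Int) + 1) 1).map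
          (fun u => PySem.List.len (G1.getD u []))).length = m + 1 := by
        simp [PySem.List.length_pyRange_one]
      have hlen2 : ([(0:Int)] ++ (PySem.List.pyRange 1 ((m : Int) + 1) 1).map
          (fun v => PySem.List.len (G2.getD v []))).length = m + 1 := by
        simp [PySem.List.length_pyRange_one]
      have hrep : List.replicate (n.toNat - m) (0 : Int)
          = 0 :: List.replicate (n.toNat - (m + 1)) 0 := by
        have : n.toNat - m = (n.toNat - (m + 1)) + 1 := by omega
        rw [this, List.replicate_succ]
      have hidx : ((m : Int) + 1).toNat = m + 1 := by omega
      simp only [List.foldl_cons, List.foldl_nil, PySem.List.pySetD_of_nonneg _ _ (by omega : (0:Int) ≤ (m:Int)+1),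
        hidx, hrep]
      rw [List.set_append_right _ _ (le_of_eq hlen1), List.set_append_right _ _ (le_of_eq hlen2),
        hlen1, hlen2]
      simp
  have hc : ((n.toNat : Int)) + 1 = n + 1 := by omega
  have := aux n.toNat (by omega)
  rw [hc] at this
  rw [this]
  simp


-- the main simulation: A's stateful search returns its state unchanged and appends exactly
-- the solutions B's pure extend computes
theorem search_eq_extend (G1 G2 : PySem.Dict Int (List Int)) (n : Int)
    (pm : PySem.Dict Int (List Int)) (deg1 deg2 order : List Int)
    (hpm : ∀ u ∈ order, pm.getD u [] = (PySem.List.pyRange 1 (n + 1) 1).filter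
      (fun v => PySem.List.pyGetD deg2 v 0 == PySem.List.pyGetD deg1 u 0))
    (horder : ∀ x ∈ order, 1 ≤ x ∧ x < n + 1)
    (hnodup : order.Nodup) (hlen : order.length = n.toNat) :
    ∀ (fuel pos : Nat) (used : List Bool) (cmap : List Int) (sols : List (List Int)),
      used.length = (n + 1).toNat → cmap.length = (n + 1).toNat →
      (∀ v : Int, 1 ≤ v → v < n + 1 → (used.getD v.toNat false = true ↔ v ∈ cmap)) →
      (∀ (k : Nat) (hk : k < order.length), pos ≤ k → cmap.getD (order[k]).toNat 0 = 0) →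
      pvSearchA G1 G2 n pm order fuel pos (used, cmap, sols)
        = (used, cmap, sols ++ pvExtendB G1 G2 n deg1 deg2 order fuel pos cmap) := by
  intro fuel
  induction fuel with
  | zero =>
    intro pos used cmap sols _ _ _ _
    simp only [pvSearchA, pvExtendB]
    split_ifs with h <;> simp
  | succ f ihf =>
    intro pos used cmap sols hul hcl hused hfree
    by_cases hpos : n ≤ (pos : Int)
    · simp only [pvSearchA, pvExtendB, if_pos hpos]
    · simp only [pvSearchA, pvExtendB, if_neg hpos]
      have hposlt : pos < order.length := by rw [hlen]; omega
      have hu_eq : PySem.List.pyGetD order (pos : Int) 0 = order[pos] := by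
        rw [PySem.List.pyGetD_natCast]
        exact List.getD_eq_getElem order 0 hposlt
      rw [hu_eq]
      have humem : order[pos] ∈ order := List.getElem_mem hposlt
      obtain ⟨hu1, hu2⟩ := horder order[pos] humem
      have hulen : (order[pos]).toNat < cmap.length := by rw [hcl]; omega
      have hcm0 : cmap[(order[pos]).toNat] = 0 := by
        have h := hfree pos hposlt (Nat.le_refl pos)
        rwa [List.getD_eq_getElem cmap 0 hulen] at h
      have hsplice : ∀ v : Int,
          PySem.List.slice cmap none (some order[pos]) ++ [v] ++
            PySem.List.slice cmap (some (order[pos] + 1)) none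
          = cmap.set (order[pos]).toNat v :=
        fun v => splice_eq_set cmap order[pos] v (by omega) hulen
      simp only [hsplice]
      rw [hpm order[pos] humem]
      have hnest : List.foldl
          (fun sols v =>
            if ((PySem.List.pyGetD deg2 v 0 == PySem.List.pyGetD deg1 order[pos] 0) && !cmap.contains v &&
                pvConsistentB G1 G2 cmap order[pos] v) = true then
              sols ++ pvExtendB G1 G2 n deg1 deg2 order f (pos + 1) (cmap.set (order[pos]).toNat v)
            else sols)
          [] (PySem.List.pyRange 1 (n + 1) 1)
          = List.foldl
          (fun sols v =>
            if (PySem.List.pyGetD deg2 v 0 == PySem.List.pyGetD deg1 order[pos] 0) = true then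
              (if (!cmap.contains v && pvConsistentB G1 G2 cmap order[pos] v) = true then
                sols ++ pvExtendB G1 G2 n deg1 deg2 order f (pos + 1) (cmap.set (order[pos]).toNat v)
              else sols)
            else sols)
          [] (PySem.List.pyRange 1 (n + 1) 1) := by
        apply PySem.List.foldl_congr_mem
        intro acc x _
        cases hA : (PySem.List.pyGetD deg2 x 0 == PySem.List.pyGetD deg1 order[pos] 0) with
        | true =>
          simp only [hA, Bool.true_and]
          rw [if_pos trivial]
        | false =>
          simp only [hA, Bool.false_and]
          rw [if_neg (show ¬((false : Bool) = true) by simp),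
            if_neg (show ¬((false : Bool) = true) by simp)]
      rw [hnest, PySem.List.foldl_if_eq_foldl_filter]
      have hsub : ∀ c ∈ (PySem.List.pyRange 1 (n + 1) 1).filter
          (fun v => PySem.List.pyGetD deg2 v 0 == PySem.List.pyGetD deg1 order[pos] 0),
          1 ≤ c ∧ c < n + 1 := by
        intro c hcmem
        exact PySem.List.mem_pyRange_one.mp (List.mem_of_mem_filter hcmem)
      have key : ∀ (l : List Int), (∀ c ∈ l, 1 ≤ c ∧ c < n + 1) →
          ∀ (sols : List (List Int)),
          pvLoopA (pvSearchA G1 G2 n pm order f (pos + 1))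
            (fun st c => !PySem.List.pyGetD st.1 c false && pvCheckA G1 G2 st.2.1 order[pos] c)
            order[pos] l (used, cmap, sols)
          = (used, cmap,
              l.foldl (fun s v =>
                if (!cmap.contains v && pvConsistentB G1 G2 cmap order[pos] v) = true then
                  s ++ pvExtendB G1 G2 n deg1 deg2 order f (pos + 1) (cmap.set (order[pos]).toNat v)
                else s) sols) := by
        intro l
        induction l with
        | nil => intro _ sols; simp [pvLoopA]
        | cons c rest ih =>
          intro hsubl sols
          obtain ⟨hc1, hc2⟩ := hsubl c (List.mem_cons_self)
          have hcidx : c.toNat < used.length := by rw [hul]; omega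
          have hbit : PySem.List.pyGetD used c false = cmap.contains c := by
            rw [PySem.List.pyGetD_of_nonneg used false (by omega), List.contains_eq_mem]
            have h := hused c hc1 hc2
            by_cases hm : c ∈ cmap
            · simp only [hm, decide_true]; exact h.mpr hm
            · simp only [hm, decide_false]
              cases hb : used.getD c.toNat false
              · rfl
              · exact absurd (h.mp hb) hm
          simp only [pvLoopA, List.foldl_cons]
          rw [hbit, check_eq_consistent G1 G2 cmap order[pos] c]
          by_cases hgo : (!cmap.contains c && pvConsistentB G1 G2 cmap order[pos] c) = true
          · rw [if_pos hgo, if_pos hgo]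
            have hcnot : c ∉ cmap := by
              have h1 := (Bool.and_eq_true _ _).mp hgo |>.1
              simp [List.contains_eq_mem] at h1
              exact h1
            rw [PySem.List.pySetD_of_nonneg used true (by omega : (0:Int) ≤ c),
              PySem.List.pySetD_of_nonneg cmap c (by omega : (0:Int) ≤ order[pos])]
            rw [ihf (pos + 1) (used.set c.toNat true) (cmap.set (order[pos]).toNat c) sols
              (by simp [hul]) (by simp [hcl])
              (by
                intro v hv1 hv2
                by_cases hvc : v = c
                · subst hvc
                  constructor
                  · intro _
                    rw [mem_set_iff_of_zero cmap (order[pos]).toNat hulen hcm0 v (by omega) v]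
                    exact Or.inl rfl
                  · intro _
                    simp [List.getD, List.getElem?_set_self, hcidx]
                · have htn : v.toNat ≠ c.toNat := by omega
                  have hset : (used.set c.toNat true).getD v.toNat false = used.getD v.toNat false := by
                    simp [List.getD, List.getElem?_set_ne (Ne.symm htn)]
                  rw [hset, mem_set_iff_of_zero cmap (order[pos]).toNat hulen hcm0 v (by omega) c]
                  rw [hused v hv1 hv2]
                  constructor
                  · exact Or.inr
                  · rintro (h | h)
                    · exact absurd h hvc
                    · exact h)
              (by
                intro k hk hkge
                have hkp : k ≠ pos := by omega
                have hne : order[k] ≠ order[pos] := fun he => hkp (hnodup.getElem_inj_iff.mp he)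
                obtain ⟨hb1, hb2⟩ := horder order[k] (List.getElem_mem hk)
                have htn : (order[k]).toNat ≠ (order[pos]).toNat := by omega
                have hset : (cmap.set (order[pos]).toNat c).getD (order[k]).toNat 0
                    = cmap.getD (order[k]).toNat 0 := by
                  simp [List.getD, List.getElem?_set_ne (Ne.symm htn)]
                rw [hset]
                exact hfree k hk (by omega))]
            have husedc : used[c.toNat] = false := by
              have h := hused c hc1 hc2
              cases hb : used.getD c.toNat false
              · rwa [List.getD_eq_getElem used false hcidx] at hb
              · exact absurd (h.mp hb) hcnot
            have hrest1 : PySem.List.pySetD (used.set c.toNat true) c false = used := by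
              rw [PySem.List.pySetD_of_nonneg _ false (by omega : (0:Int) ≤ c), List.set_set]
              conv_rhs => rw [← List.set_getElem_self hcidx]
              rw [husedc]
            have hrest2 : PySem.List.pySetD (cmap.set (order[pos]).toNat c) order[pos] 0 = cmap := by
              rw [PySem.List.pySetD_of_nonneg _ 0 (by omega : (0:Int) ≤ order[pos]), List.set_set]
              conv_rhs => rw [← List.set_getElem_self hulen]
              rw [hcm0]
            simp only [hrest1, hrest2]
            exact ih (fun x hx => hsubl x (List.mem_cons_of_mem c hx)) _
          · rw [if_neg hgo, if_neg hgo]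
            exact ih (fun x hx => hsubl x (List.mem_cons_of_mem c hx)) sols
      rw [key _ hsub sols]
      have hflat : ∀ (init : List (List Int)),
          ((PySem.List.pyRange 1 (n + 1) 1).filter
            (fun v => PySem.List.pyGetD deg2 v 0 == PySem.List.pyGetD deg1 order[pos] 0)).foldl
            (fun s v =>
              if (!cmap.contains v && pvConsistentB G1 G2 cmap order[pos] v) = true then
                s ++ pvExtendB G1 G2 n deg1 deg2 order f (pos + 1) (cmap.set (order[pos]).toNat v)
              else s) init
          = init ++ ((PySem.List.pyRange 1 (n + 1) 1).filter
            (fun v => PySem.List.pyGetD deg2 v 0 == PySem.List.pyGetD deg1 order[pos] 0)).flatMap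
            (fun v =>
              if (!cmap.contains v && pvConsistentB G1 G2 cmap order[pos] v) = true then
                pvExtendB G1 G2 n deg1 deg2 order f (pos + 1) (cmap.set (order[pos]).toNat v)
              else []) := by
        intro init
        rw [← PySem.List.foldl_append_eq_flatMap]
        apply PySem.List.foldl_congr_mem
        intro acc x _
        cases h : (!cmap.contains x && pvConsistentB G1 G2 cmap order[pos] x) with
        | true =>
          rw [if_pos (h ▸ rfl), if_pos (h ▸ rfl)]
        | false =>
          rw [if_neg (by simp [h]), if_neg (by simp [h])]
          simp
      rw [hflat sols, hflat []]
      simp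

theorem getD_replicate_false (sz : Nat) (k : Nat) :
    (List.replicate sz false).getD k false = false := by
  rcases h : (List.replicate sz false)[k]? with _ | x
  · simp [List.getD, h]
  · have := List.eq_of_mem_replicate (List.mem_of_getElem? h)
    simp [List.getD, h, this]

theorem getD_replicate_zero (sz : Nat) (k : Nat) :
    (List.replicate sz (0 : Int)).getD k 0 = 0 := by
  rcases h : (List.replicate sz (0 : Int))[k]? with _ | x
  · simp [List.getD, h]
  · have := List.eq_of_mem_replicate (List.mem_of_getElem? h)
    simp [List.getD, h, this]

-- a contained key's get? is some of its getD
theorem get?_eq_some_getD (G : PySem.Dict Int (List Int)) (i : Int) (h : G.contains i = true) :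
    G.get? i = some (G.getD i []) := by
  rcases hg : G.get? i with _ | v
  · rw [PySem.Dict.contains_eq_isSome_get?, hg] at h
    cases h
  · rw [PySem.Dict.getD_of_get?_eq_some G [] hg]

-- under Pre_, A's option-threaded degree loop is the plain getD loop
theorem degs_fold_some (G1 G2 : PySem.Dict Int (List Int)) (ks : List Int)
    (h : ∀ i ∈ ks, G1.contains i = true ∧ G2.contains i = true) :
    ∀ d : List Int × List Int,
    ks.foldl (fun acc i =>
      match acc with
      | none => none
      | some d =>
        match G1.get? i, G2.get? i with
        | some l1, some l2 =>
          some (PySem.List.pySetD d.1 i (PySem.List.len l1),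
                PySem.List.pySetD d.2 i (PySem.List.len l2))
        | _, _ => none) (some d)
    = some (ks.foldl (fun (d : List Int × List Int) i =>
        (PySem.List.pySetD d.1 i (PySem.List.len (G1.getD i [])),
         PySem.List.pySetD d.2 i (PySem.List.len (G2.getD i [])))) d) := by
  induction ks with
  | nil => intro d; rfl
  | cons k rest ih =>
    intro d
    obtain ⟨h1, h2⟩ := h k List.mem_cons_self
    simp only [List.foldl_cons, get?_eq_some_getD G1 k h1, get?_eq_some_getD G2 k h2]
    exact ih (fun i hi => h i (List.mem_cons_of_mem k hi)) _

-- under Pre_, B's mapM over get? is some of the map over getD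
theorem mapM_get?_some (G : PySem.Dict Int (List Int)) (ks : List Int)
    (h : ∀ i ∈ ks, G.contains i = true) :
    ks.mapM (fun u => G.get? u) = some (ks.map (fun u => G.getD u [])) := by
  induction ks with
  | nil => rfl
  | cons k rest ih =>
    rw [List.mapM_cons, get?_eq_some_getD G k (h k List.mem_cons_self),
      ih (fun i hi => h i (List.mem_cons_of_mem k hi))]
    rfl

theorem find_bijections_eq_alt (graph1 graph2 : List (Int × List Int)) (node_count : Int)
    (hpre : Pre_find_bijections graph1 graph2 node_count) :
    find_bijections graph1 graph2 node_count = find_bijections_alt graph1 graph2 node_count := by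
  obtain ⟨-, -, hkeys⟩ := hpre
  simp only [find_bijections, find_bijections_alt]
  rw [degs_fold_some (PySem.Dict.ofList graph1) (PySem.Dict.ofList graph2) _
      (fun i hi => ⟨(hkeys i hi).1, (hkeys i hi).2.1⟩),
    mapM_get?_some (PySem.Dict.ofList graph1) _ (fun i hi => (hkeys i hi).1),
    mapM_get?_some (PySem.Dict.ofList graph2) _ (fun i hi => (hkeys i hi).2.1)]
  simp only [List.map_map, Function.comp_def]
  by_cases hn : node_count ≤ 0
  · rw [PySem.List.pyRange_one_eq_nil (by omega : node_count + 1 ≤ 1)]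
    have h0 : node_count.toNat = 0 := by omega
    rw [h0]
    simp [pvSearchA, pvExtendB, hn, PySem.List.sorted]
  · have hn' : (0 : Int) ≤ node_count := by omega
    rw [deg_loop_eq (PySem.Dict.ofList graph1) (PySem.Dict.ofList graph2) node_count hn']
    set G1 := PySem.Dict.ofList graph1
    set G2 := PySem.Dict.ofList graph2
    set dg1 := [(0 : Int)] ++ (PySem.List.pyRange 1 (node_count + 1) 1).map
      (fun u => PySem.List.len (G1.getD u [])) with hdg1
    set dg2 := [(0 : Int)] ++ (PySem.List.pyRange 1 (node_count + 1) 1).map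
      (fun v => PySem.List.len (G2.getD v [])) with hdg2
    set ord := PySem.List.sorted (PySem.List.pyRange 1 (node_count + 1) 1)
      (fun x => -(PySem.List.pyGetD dg1 x 0)) false with hord
    set pm := (PySem.List.pyRange 1 (node_count + 1) 1).foldl
      (fun d u => d.insert u ((PySem.List.pyRange 1 (node_count + 1) 1).filter
        (fun v => PySem.List.pyGetD dg2 v 0 == PySem.List.pyGetD dg1 u 0)))
      PySem.Dict.empty with hpmdef
    have hmemord : ∀ x ∈ ord, x ∈ PySem.List.pyRange 1 (node_count + 1) 1 := by
      intro x hx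
      rw [hord] at hx
      exact (PySem.List.mem_sorted _ _ _ x).mp hx
    have hpm : ∀ u ∈ ord, pm.getD u [] = (PySem.List.pyRange 1 (node_count + 1) 1).filter
        (fun v => PySem.List.pyGetD dg2 v 0 == PySem.List.pyGetD dg1 u 0) := by
      intro u hu
      exact getD_foldl_insert_of_mem _ _ _ u (hmemord u hu) (PySem.List.nodup_pyRange_one _ _)
    have horder : ∀ x ∈ ord, 1 ≤ x ∧ x < node_count + 1 := by
      intro x hx
      exact PySem.List.mem_pyRange_one.mp (hmemord x hx)
    have hnodup : ord.Nodup := by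
      rw [hord]
      exact ((PySem.List.sorted_perm _ _ _).nodup_iff).mpr (PySem.List.nodup_pyRange_one _ _)
    have hlenord : ord.length = node_count.toNat := by
      rw [hord, PySem.List.length_sorted, PySem.List.length_pyRange_one]
      omega
    rw [search_eq_extend G1 G2 node_count pm dg1 dg2 ord hpm horder hnodup hlenord
      node_count.toNat 0
      (List.replicate (node_count + 1).toNat false) (List.replicate (node_count + 1).toNat 0) []
      (List.length_replicate) (List.length_replicate)
      (by
        intro v hv1 _
        rw [getD_replicate_false]
        constructor
        · intro h; cases h
        · intro h
          have := List.eq_of_mem_replicate h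
          omega)
      (by intro k _ _; rw [getD_replicate_zero])]
    rw [PySem.List.foldl_append_singleton_eq_self]
    simp only [Option.elim, List.map_map, Function.comp_def, List.nil_append]
    rw [hord, hdg1, hdg2]

-- ===== VERDICT (by name: the statement is the Claim_ definition above) =====
theorem find_bijections_spec : Claim_equal_find_bijections := by
  intro g1 g2 n _ hpre
  exact find_bijections_eq_alt g1 g2 n hpre
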